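-- pv_equiv track=rewrite | github.com/sean-lai-sh/exp-orchestrator | backend/plugin_validation.py | _static_check
-- ===== SOURCE A (Python) =====
-- _SECURITY_ERRORS = ["--privileged", "USER root"]
--
-- def _static_check(dockerfile_text: str) -> list[str]:
--     errors: list[str] = []
--     lines = dockerfile_text.splitlines()
--     instructions = [l.strip() for l in lines if l.strip() and not l.strip().startswith("#")]
--
--     if not any(l.upper().startswith("FROM") for l in instructions):
--         errors.append("Dockerfile is missing a FROM instruction")
--
--     for bad in _SECURITY_ERRORS:
--         if any(bad in l for l in instructions):
--             errors.append(f"Dockerfile contains disallowed instruction: {bad!r}")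
--
--     return errors
-- ===== SOURCE B (Python) =====
-- _SECURITY_ERRORS = ["--privileged", "USER root"]
--
-- def _static_check(dockerfile_text: str) -> list[str]:
--     # single pass over the lines, maintaining cross-check flags
--     has_from = False
--     seen = [False] * len(_SECURITY_ERRORS)
--     for raw in dockerfile_text.splitlines():
--         l = raw.strip()
--         if not l or l.startswith("#"):
--             continue
--         if l.upper().startswith("FROM"):
--             has_from = True
--         seen = [s or (bad in l) for bad, s in zip(_SECURITY_ERRORS, seen)]
--     errors: list[str] = []
--     if not has_from:
--         errors.append("Dockerfile is missing a FROM instruction")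
--     for bad, s in zip(_SECURITY_ERRORS, seen):
--         if s:
--             errors.append(f"Dockerfile contains disallowed instruction: {bad!r}")
--     return errors
-- ===== Notes on version B (the rewrite author's own statement) =====
-- stated objective: alternative
-- what changed: B replaces A's three separate scans over the instruction list (one any() for FROM, one any() per security pattern) with a single pass over the lines maintaining a has_from flag and a seen-flag per pattern, assembling the errors afterwards in A's order.
import Mathlib
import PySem

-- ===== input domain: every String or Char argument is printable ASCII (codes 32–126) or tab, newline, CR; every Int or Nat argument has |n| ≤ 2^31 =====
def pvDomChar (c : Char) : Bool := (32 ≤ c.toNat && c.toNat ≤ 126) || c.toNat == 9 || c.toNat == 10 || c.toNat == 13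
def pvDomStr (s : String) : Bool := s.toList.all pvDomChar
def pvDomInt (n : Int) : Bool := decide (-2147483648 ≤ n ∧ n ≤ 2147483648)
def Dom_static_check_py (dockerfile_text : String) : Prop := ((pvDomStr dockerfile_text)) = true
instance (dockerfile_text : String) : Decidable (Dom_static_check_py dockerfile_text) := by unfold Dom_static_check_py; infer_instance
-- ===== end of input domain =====

-- B does one pass over the lines maintaining flags instead of A's three separate any() scans; same output, similar cost.

-- ===== PORT A =====
def pvSecErrors : List String := ["--privileged", "USER root"]

def static_check_py (dockerfile_text : String) : List String :=
  let lines := PySem.Str.splitlines dockerfile_text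
  let instructions := (lines.filter (fun l =>
      PySem.Str.strip l != "" && !PySem.Str.startswith (PySem.Str.strip l) "#")).map PySem.Str.strip
  let errors : List String :=
    if !(instructions.any (fun l => PySem.Str.startswith (PySem.Str.upper l) "FROM")) then
      ["Dockerfile is missing a FROM instruction"]
    else []
  pvSecErrors.foldl (fun errs bad =>
    if instructions.any (fun l => PySem.Str.isIn bad l) then
      errs ++ ["Dockerfile contains disallowed instruction: '" ++ bad ++ "'"]
    else errs) errors

-- ===== PORT B =====
def pvStepB (st : Bool × List Bool) (raw : String) : Bool × List Bool :=
  let l := PySem.Str.strip raw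
  if l == "" || PySem.Str.startswith l "#" then st
  else
    ((st.1 || PySem.Str.startswith (PySem.Str.upper l) "FROM"),
     (pvSecErrors.zip st.2).map (fun p => p.2 || PySem.Str.isIn p.1 l))

def static_check_py_alt (dockerfile_text : String) : List String :=
  let st := (PySem.Str.splitlines dockerfile_text).foldl pvStepB
              (false, List.replicate pvSecErrors.length false)
  let errors : List String :=
    if !st.1 then ["Dockerfile is missing a FROM instruction"] else []
  errors ++ (pvSecErrors.zip st.2).filterMap (fun p =>
    if p.2 then some ("Dockerfile contains disallowed instruction: '" ++ p.1 ++ "'") else none)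

-- ===== PRECONDITION & SPEC =====
def Spec_static_check_py (dockerfile_text : String) (out : List String) : Prop := out = static_check_py_alt dockerfile_text
instance (dockerfile_text : String) (out : List String) : Decidable (Spec_static_check_py dockerfile_text out) := by unfold Spec_static_check_py; infer_instance

-- ===== CLAIM (what is proved, stated in full; the proofs are below) =====
def Claim_equal_static_check_py : Prop := ∀ (dockerfile_text : String), Dom_static_check_py dockerfile_text → Spec_static_check_py dockerfile_text (static_check_py dockerfile_text)

-- ===== LEMMAS AND PROOFS =====

-- the filtered+stripped instruction list A scans three times
def pvInstrs (lines : List String) : List String :=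
  (lines.filter (fun l =>
      PySem.Str.strip l != "" && !PySem.Str.startswith (PySem.Str.strip l) "#")).map PySem.Str.strip

-- B's single-pass flags equal A's three any() scans over the instruction list
lemma pvFold_state (lines : List String) (b0 s1 s2 : Bool) :
    lines.foldl pvStepB (b0, [s1, s2]) =
      (b0 || (pvInstrs lines).any (fun l => PySem.Str.startswith (PySem.Str.upper l) "FROM"),
       [s1 || (pvInstrs lines).any (fun l => PySem.Str.isIn "--privileged" l),
        s2 || (pvInstrs lines).any (fun l => PySem.Str.isIn "USER root" l)]) := by
  induction lines generalizing b0 s1 s2 with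
  | nil => simp [pvInstrs]
  | cons x xs ih =>
      simp only [List.foldl_cons, pvStepB]
      by_cases h : (PySem.Str.strip x == "" || PySem.Str.startswith (PySem.Str.strip x) "#") = true
      · have hfilt : (PySem.Str.strip x != "" && !PySem.Str.startswith (PySem.Str.strip x) "#") = false := by
          cases hb : PySem.Str.strip x == "" <;>
            cases hc : PySem.Str.startswith (PySem.Str.strip x) "#" <;> simp_all
        rw [if_pos h, ih]
        simp only [pvInstrs, List.filter_cons, hfilt, Bool.false_eq_true, if_false]
      · have hfilt : (PySem.Str.strip x != "" && !PySem.Str.startswith (PySem.Str.strip x) "#") = true := by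
          cases hb : PySem.Str.strip x == "" <;>
            cases hc : PySem.Str.startswith (PySem.Str.strip x) "#" <;> simp_all
        rw [if_neg h]
        simp only [pvSecErrors, List.zip, List.zipWith, List.map]
        rw [ih]
        simp only [pvInstrs, List.filter_cons, hfilt, if_true, List.map_cons, List.any_cons,
          Bool.or_assoc]

-- ===== VERDICT (by name: the statement is the Claim_ definition above) =====
theorem static_check_py_spec : Claim_equal_static_check_py := by
  intro t _
  unfold Spec_static_check_py static_check_py static_check_py_alt
  rw [show (List.replicate pvSecErrors.length false) = [false, false] from rfl, pvFold_state]
  simp only [pvInstrs, Bool.false_or]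
  set instrs := ((PySem.Str.splitlines t).filter (fun l =>
      PySem.Str.strip l != "" && !PySem.Str.startswith (PySem.Str.strip l) "#")).map PySem.Str.strip
  simp only [pvSecErrors, List.foldl_cons, List.foldl_nil, List.zip, List.zipWith, List.filterMap]
  generalize instrs.any (fun l => PySem.Str.startswith (PySem.Str.upper l) "FROM") = bF
  generalize instrs.any (fun l => PySem.Str.isIn "--privileged" l) = b1
  generalize instrs.any (fun l => PySem.Str.isIn "USER root" l) = b2
  cases bF <;> cases b1 <;> cases b2 <;> rfl
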